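-- pv_equiv track=rewrite | github.com/rickyurvinauc/IIC1103_TAV_2025 | ayudantias/ayudantia2/P9-c.strings-llaves-C.py | casi_llave
-- ===== SOURCE A (Python) =====
-- def casi_llave(p, q):
--     # largo de la cadena q
--     n = len(q)
--     # recorrer la cadena p desde el indice 0 hasta len(p)-len(q)+1
--     for i in range(len(p) - n + 1):
--         # obtener la subcadena de p que va desde i hasta i+n
--         # debe ser desde i hasta i+n porque debe tener el largo del string q
--         p2 = p[i:i+n]
--         # supongamos que es llave
--         es_llave = True
--         # este trozo de codigo es igual a funcion es_llave del ejercicio anterior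
--         # recorrer largo de string q
--         for j in range(n):
--             if p2[j].islower() != q[j].islower():
--                 es_llave = False
--                 break
--         # si es que es_llave sigue siendo verdadera retornar True
--         if es_llave == True:
--             return True
--     return False
-- ===== SOURCE B (Python) =====
-- def casi_llave(p, q):
--     # Encode the islower() pattern of each string as a 0/1 string and reduce
--     # the problem to the built-in substring test.
--     mask = lambda s: ''.join('1' if c.islower() else '0' for c in s)
--     return mask(q) in mask(p)
-- ===== Notes on version B (the rewrite author's own statement) =====
-- stated objective: alternative
-- what changed: Instead of A's explicit double loop comparing islower() char-by-char over every window of p, B encodes the islower() pattern of p and q once as 0/1 strings and reduces the task to the built-in substring test 'in'.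
import Mathlib
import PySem

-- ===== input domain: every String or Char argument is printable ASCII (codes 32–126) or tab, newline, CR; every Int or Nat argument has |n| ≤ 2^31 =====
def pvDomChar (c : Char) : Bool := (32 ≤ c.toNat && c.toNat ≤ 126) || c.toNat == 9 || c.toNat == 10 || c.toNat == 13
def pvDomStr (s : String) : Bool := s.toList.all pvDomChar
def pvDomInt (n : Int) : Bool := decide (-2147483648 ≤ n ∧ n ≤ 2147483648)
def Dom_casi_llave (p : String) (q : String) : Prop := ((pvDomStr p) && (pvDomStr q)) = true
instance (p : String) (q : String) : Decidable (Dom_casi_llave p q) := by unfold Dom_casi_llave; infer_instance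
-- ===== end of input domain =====

-- B replaces A's window-by-window double loop by encoding each string's
-- islower() pattern once as a 0/1 string and using the built-in substring test (alternative decomposition).

-- ===== PORT A =====
-- inner loop 'for j in range(n): if p2[j].islower() != q[j].islower(): …break'
-- (indices are always in range when called, so pyGetD's default is never read)
def pvCheckA (p2 qs : List Char) : List Int → Bool
  | [] => true
  | j :: js =>
    if PySem.Chars.islower (PySem.List.pyGetD p2 j ' ')
         ≠ PySem.Chars.islower (PySem.List.pyGetD qs j ' ')
    then false
    else pvCheckA p2 qs js

-- outer loop 'for i in range(len(p) - n + 1): …'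
def pvLoopA (ps qs : List Char) : List Int → Bool
  | [] => false
  | i :: is =>
    let p2 := PySem.List.slice ps (some i) (some (i + (qs.length : Int)))
    if pvCheckA p2 qs (PySem.List.pyRange 0 (qs.length : Int) 1) = true then true
    else pvLoopA ps qs is

def casi_llave (p : String) (q : String) : Bool :=
  pvLoopA p.toList q.toList
    (PySem.List.pyRange 0 ((p.toList.length : Int) - (q.toList.length : Int) + 1) 1)

-- ===== PORT B =====
-- mask(s) = ''.join('1' if c.islower() else '0' for c in s)
def pvMask (s : List Char) : List Char :=
  s.map (fun c => if PySem.Chars.islower c then '1' else '0')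

-- 'mask(q) in mask(p)'
def casi_llave_alt (p : String) (q : String) : Bool :=
  PySem.Chars.isIn (pvMask q.toList) (pvMask p.toList)

-- ===== PRECONDITION & SPEC =====
def Spec_casi_llave (p : String) (q : String) (out : Bool) : Prop := out = casi_llave_alt p q
instance (p : String) (q : String) (out : Bool) : Decidable (Spec_casi_llave p q out) := by unfold Spec_casi_llave; infer_instance

-- ===== CLAIM (what is proved, stated in full; the proofs are below) =====
def Claim_equal_casi_llave : Prop := ∀ (p : String) (q : String), Dom_casi_llave p q → Spec_casi_llave p q (casi_llave p q)

-- ===== LEMMAS AND PROOFS =====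

lemma pvCheckA_iff (p2 qs : List Char) (js : List Int) :
    pvCheckA p2 qs js = true ↔
      ∀ j ∈ js, PySem.Chars.islower (PySem.List.pyGetD p2 j ' ')
        = PySem.Chars.islower (PySem.List.pyGetD qs j ' ') := by
  induction js with
  | nil => simp [pvCheckA]
  | cons j js ih =>
    simp only [pvCheckA]
    split_ifs with h
    · simp only [false_iff]
      intro hall
      exact h (hall j (List.mem_cons_self ..))
    · push Not at h
      simp [ih, h]

lemma pvMask_eq_iff (a b : List Char) (hlen : a.length = b.length) :
    pvMask a = pvMask b ↔
      ∀ j : Nat, (hj : j < b.length) →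
        PySem.Chars.islower (a[j]'(by omega)) = PySem.Chars.islower (b[j]'hj) := by
  constructor
  · intro h j hj
    have := congrArg (fun l => l[j]?) h
    simp only [pvMask, List.getElem?_map] at this
    rw [List.getElem?_eq_getElem (by omega : j < a.length),
        List.getElem?_eq_getElem hj] at this
    simp only [Option.map_some, Option.some.injEq] at this
    by_cases h1 : PySem.Chars.islower (a[j]'(by omega)) <;>
      by_cases h2 : PySem.Chars.islower (b[j]'hj) <;> simp_all
  · intro h
    apply List.ext_getElem (by simp [pvMask, hlen])
    intro j hj1 hj2
    simp only [pvMask, List.getElem_map]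
    have := h j (by simpa [pvMask] using hj2)
    rw [this]

-- window check = mask equality, when the window has the pattern's length
lemma pvCheckA_range (p2 qs : List Char) (hlen : p2.length = qs.length) :
    pvCheckA p2 qs (PySem.List.pyRange 0 (qs.length : Int) 1) = true ↔
      pvMask p2 = pvMask qs := by
  rw [pvCheckA_iff, pvMask_eq_iff p2 qs hlen]
  constructor
  · intro h j hj
    have hm : (j : Int) ∈ PySem.List.pyRange 0 (qs.length : Int) 1 := by
      rw [PySem.List.mem_pyRange_one]; omega
    have := h (j : Int) hm
    rwa [PySem.List.pyGetD_natCast, PySem.List.pyGetD_natCast,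
      List.getD_eq_getElem _ _ (by omega), List.getD_eq_getElem _ _ hj] at this
  · intro h j hj
    rw [PySem.List.mem_pyRange_one] at hj
    obtain ⟨k, rfl⟩ : ∃ k : Nat, (k : Int) = j := ⟨j.toNat, by omega⟩
    have hk : k < qs.length := by omega
    rw [PySem.List.pyGetD_natCast, PySem.List.pyGetD_natCast,
      List.getD_eq_getElem _ _ (by omega), List.getD_eq_getElem _ _ hk]
    exact h k hk

lemma pvLoopA_iff (ps qs : List Char) (is : List Int) :
    pvLoopA ps qs is = true ↔
      ∃ i ∈ is, pvCheckA (PySem.List.slice ps (some i) (some (i + (qs.length : Int)))) qs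
        (PySem.List.pyRange 0 (qs.length : Int) 1) = true := by
  induction is with
  | nil => simp [pvLoopA]
  | cons i is ih =>
    simp only [pvLoopA]
    split_ifs with h
    · simp only [true_iff]
      exact ⟨i, List.mem_cons_self .., h⟩
    · rw [ih]
      constructor
      · rintro ⟨i', hmem, hchk⟩; exact ⟨i', List.mem_cons_of_mem _ hmem, hchk⟩
      · rintro ⟨i', hmem, hchk⟩
        rcases List.mem_cons.mp hmem with rfl | hmem'
        · exact absurd hchk h
        · exact ⟨i', hmem', hchk⟩

-- the whole of A: true iff the mask of q is a prefix of some suffix of the mask of p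
lemma pvLoopA_full (ps qs : List Char) :
    pvLoopA ps qs (PySem.List.pyRange 0 ((ps.length : Int) - (qs.length : Int) + 1) 1) = true ↔
      ∃ j : Nat, pvMask qs <+: (pvMask ps).drop j := by
  rw [pvLoopA_iff]
  constructor
  · rintro ⟨i, hmem, hchk⟩
    rw [PySem.List.mem_pyRange_one] at hmem
    obtain ⟨hi0, hiub⟩ := hmem
    have hslice := PySem.List.slice_toNat ps hi0
      (show (0:Int) ≤ i + (qs.length : Int) by omega)
    have harg : ((i + (qs.length : Int)).toNat - i.toNat) = qs.length := by omega
    rw [hslice, harg] at hchk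
    have hwlen : ((ps.drop i.toNat).take qs.length).length = qs.length := by
      simp [List.length_take, List.length_drop]; omega
    rw [pvCheckA_range _ _ hwlen] at hchk
    refine ⟨i.toNat, ?_⟩
    rw [show (pvMask ps).drop i.toNat = pvMask (ps.drop i.toNat) from
      (by simp [pvMask, List.map_drop])]
    rw [List.prefix_iff_eq_take, show (pvMask qs).length = qs.length by simp [pvMask],
      show (pvMask (ps.drop i.toNat)).take qs.length
        = pvMask ((ps.drop i.toNat).take qs.length) from (by simp [pvMask, List.map_take])]
    exact hchk.symm
  · rintro ⟨j, hpre⟩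
    have hlenle : qs.length + j ≤ ps.length ∨ qs.length = 0 := by
      have := hpre.length_le
      simp only [pvMask, List.length_map, List.length_drop] at this
      omega
    have hcases : ∃ j' : Nat, j' + qs.length ≤ ps.length ∧ pvMask qs <+: (pvMask ps).drop j' := by
      rcases hlenle with h | h
      · exact ⟨j, by omega, hpre⟩
      · refine ⟨0, by omega, ?_⟩
        have : pvMask qs = [] := by
          simp only [pvMask, List.map_eq_nil_iff]
          exact List.length_eq_zero_iff.mp h
        simp [this]
    obtain ⟨j', hj'len, hpre'⟩ := hcases
    refine ⟨(j' : Int), ?_, ?_⟩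
    · rw [PySem.List.mem_pyRange_one]
      omega
    · have hslice := PySem.List.slice_toNat ps (show (0:Int) ≤ (j' : Int) by omega)
        (show (0:Int) ≤ (j' : Int) + (qs.length : Int) by omega)
      have harg : (((j' : Int) + (qs.length : Int)).toNat - (j' : Int).toNat) = qs.length := by
        omega
      rw [hslice, harg]
      have hwlen : ((ps.drop (j' : Int).toNat).take qs.length).length = qs.length := by
        simp [List.length_take, List.length_drop]; omega
      rw [pvCheckA_range _ _ hwlen]
      rw [show (pvMask ps).drop j' = pvMask (ps.drop j') from
        (by simp [pvMask, List.map_drop])] at hpre'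
      rw [List.prefix_iff_eq_take, show (pvMask qs).length = qs.length by simp [pvMask]] at hpre'
      rw [show pvMask ((ps.drop (j' : Int).toNat).take qs.length)
          = (pvMask (ps.drop j')).take qs.length from (by simp [pvMask, List.map_take])]
      exact hpre'.symm

-- ===== VERDICT (by name: the statement is the Claim_ definition above) =====
theorem casi_llave_spec : Claim_equal_casi_llave := by
  intro p q _
  unfold Spec_casi_llave casi_llave casi_llave_alt
  rw [Bool.eq_iff_iff, pvLoopA_full]
  exact PySem.Chars.exists_prefix_drop_iff_isIn _ _
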